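-- pv_equiv track=rewrite | github.com/jjinyeok/this_is_coding_test | sorting_3.py | solution
-- ===== SOURCE A (Python) =====
-- def solution(n, k, array_a, array_b):
--     array_a.sort()
--     array_b.sort(reverse=True)
--     for i in range(k):
--         if array_a[i] < array_b[i]:
--             array_a[i], array_b[i] = array_b[i], array_a[i]
--         else:
--             break
--     return sum(array_a)
-- ===== SOURCE B (Python) =====
-- def solution(n, k, array_a, array_b):
--     # Note: unlike A, B does not mutate array_a/array_b; equivalence is about the return value.
--     a = sorted(array_a)
--     b = sorted(array_b, reverse=True)
--     kk = min(k, len(a), len(b))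
--     if kk < 0:
--         kk = 0
--     # The swap condition a[t-1] < b[t-1] is antitone in t (a ascending, b descending),
--     # so binary-search the crossover index instead of walking pair by pair.
--     lo, hi = 0, kk
--     while lo < hi:
--         mid = (lo + hi + 1) // 2
--         if a[mid - 1] < b[mid - 1]:
--             lo = mid
--         else:
--             hi = mid - 1
--     return sum(a[lo:]) + sum(b[:lo])
-- ===== Notes on version B (the rewrite author's own statement) =====
-- stated objective: alternative
-- what changed: A walks the first k aligned pairs of the sorted arrays with a mutating swap loop that breaks early; B never compares pairs in a loop: it binary-searches the crossover index t (the swap condition a[t-1]<b[t-1] is antitone on the sorted arrays) and returns sum(a[t:]) + sum(b[:t]) from slices.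
import Mathlib
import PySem

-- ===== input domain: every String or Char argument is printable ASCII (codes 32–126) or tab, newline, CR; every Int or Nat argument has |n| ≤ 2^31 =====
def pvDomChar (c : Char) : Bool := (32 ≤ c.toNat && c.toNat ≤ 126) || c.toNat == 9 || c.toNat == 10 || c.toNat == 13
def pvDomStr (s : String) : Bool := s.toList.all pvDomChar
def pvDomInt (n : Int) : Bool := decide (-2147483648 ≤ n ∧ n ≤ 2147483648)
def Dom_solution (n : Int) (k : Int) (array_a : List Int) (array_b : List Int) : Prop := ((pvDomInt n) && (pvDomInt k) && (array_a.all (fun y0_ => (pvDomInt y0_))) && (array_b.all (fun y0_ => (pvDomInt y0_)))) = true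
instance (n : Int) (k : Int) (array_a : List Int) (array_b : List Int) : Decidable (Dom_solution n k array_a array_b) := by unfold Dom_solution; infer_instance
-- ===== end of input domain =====

-- B replaces A's mutating swap-and-break loop by a binary search: the swap condition is antitone on
-- the aligned sorted prefixes, so B bisects the crossover index t and returns sum(a[t:]) + sum(b[:t]).
-- (A sorts array_a/array_b in place; the equivalence is about the return value.)


-- ===== PORT A =====
-- the for-loop with its early break: one step per index i, stop when fuel runs out or a[i] >= b[i]
def loopA : Nat → List Int → List Int → Nat → List Int
  | 0, sa, _, _ => sa
  | fuel+1, sa, sb, i =>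
    if sa.getD i 0 < sb.getD i 0 then
      loopA fuel (sa.set i (sb.getD i 0)) (sb.set i (sa.getD i 0)) (i+1)
    else sa

def solution (n : Int) (k : Int) (array_a : List Int) (array_b : List Int) : Int :=
  let sa := PySem.List.sorted array_a (fun x => x) false
  let sb := PySem.List.sorted array_b (fun x => x) true
  (loopA k.toNat sa sb 0).sum

-- ===== PORT B =====
-- the while-loop of Source B (fuel only makes it total; hi-lo shrinks each step, so kk+1 steps suffice)
def bsearchB : Nat → List Int → List Int → Nat → Nat → Nat
  | 0, _, _, lo, _ => lo
  | fuel+1, a, b, lo, hi =>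
    if lo < hi then
      let mid := (lo + hi + 1) / 2
      if a.getD (mid - 1) 0 < b.getD (mid - 1) 0 then bsearchB fuel a b mid hi
      else bsearchB fuel a b lo (mid - 1)
    else lo

def solution_alt (n : Int) (k : Int) (array_a : List Int) (array_b : List Int) : Int :=
  let a := PySem.List.sorted array_a (fun x => x) false
  let b := PySem.List.sorted array_b (fun x => x) true
  let kkI := min k (min (a.length : Int) (b.length : Int))
  let kk := if kkI < 0 then 0 else kkI.toNat
  let lo := bsearchB (kk + 1) a b 0 kk
  (a.drop lo).sum + (b.take lo).sum

-- ===== PRECONDITION & SPEC =====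
-- Pre_ is exactly where A returns: with m = min(len a, len b), A raises IndexError iff k > m and
-- the loop never breaks in the first m steps, i.e. the m-th smallest of a is below the m-th largest of b.
def Pre_solution (n : Int) (k : Int) (array_a : List Int) (array_b : List Int) : Prop :=
  let m := min array_a.length array_b.length
  k ≤ (m : Int) ∨ (0 < m ∧
    (PySem.List.sorted array_b (fun x => x) true).getD (m-1) 0 ≤
    (PySem.List.sorted array_a (fun x => x) false).getD (m-1) 0)
instance (n : Int) (k : Int) (array_a : List Int) (array_b : List Int) : Decidable (Pre_solution n k array_a array_b) := by unfold Pre_solution; infer_instance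

def pvWitness_solution : Int × Int × List Int × List Int := (3, 2, [1, 2, 3], [4, 5, 6])

def Spec_solution (n : Int) (k : Int) (array_a : List Int) (array_b : List Int) (out : Int) : Prop := out = solution_alt n k array_a array_b
instance (n : Int) (k : Int) (array_a : List Int) (array_b : List Int) (out : Int) : Decidable (Spec_solution n k array_a array_b out) := by unfold Spec_solution; infer_instance


-- ===== CLAIM (what is proved, stated in full; the proofs are below) =====
def Claim_equal_solution : Prop := ∀ (n : Int) (k : Int) (array_a : List Int) (array_b : List Int), Dom_solution n k array_a array_b → Pre_solution n k array_a array_b → Spec_solution n k array_a array_b (solution n k array_a array_b)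

-- ===== LEMMAS AND PROOFS =====

-- total gain of the first `fuel` aligned pairs starting at index i
def gains : Nat → List Int → List Int → Nat → Int
  | 0, _, _, _ => 0
  | fuel+1, sa, sb, i =>
    (if sa.getD i 0 < sb.getD i 0 then sb.getD i 0 - sa.getD i 0 else 0) + gains fuel sa sb (i+1)

theorem getD_set_ne (l : List Int) (i j : Nat) (a d : Int) (h : i ≠ j) :
    (l.set i a).getD j d = l.getD j d := by
  simp [List.getD, List.getElem?_set_ne h]

theorem sum_set (l : List Int) (i : Nat) (a : Int) (h : i < l.length) :
    (l.set i a).sum = l.sum + a - l.getD i 0 := by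
  induction l generalizing i with
  | nil => simp at h
  | cons x t ih =>
    cases i with
    | zero => simp [List.getD]; ring
    | succ i =>
      simp only [List.set_cons_succ, List.sum_cons, List.getD_cons_succ,
        ih i (by simpa using h)]
      ring

theorem gains_set (fuel : Nat) (sa sb : List Int) (i : Nat) (x y : Int) :
    ∀ j, i < j → gains fuel (sa.set i y) (sb.set i x) j = gains fuel sa sb j := by
  induction fuel with
  | zero => intro j _; rfl
  | succ fuel ih =>
    intro j hj
    simp only [gains, getD_set_ne _ _ _ _ _ (Nat.ne_of_lt hj), ih (j+1) (Nat.lt_succ_of_lt hj)]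

theorem gains_zero (fuel : Nat) (sa sb : List Int) :
    ∀ i, (∀ j, i ≤ j → j < i + fuel → ¬ sa.getD j 0 < sb.getD j 0) → gains fuel sa sb i = 0 := by
  induction fuel with
  | zero => intro i _; rfl
  | succ fuel ih =>
    intro i h
    have h0 : ¬ sa.getD i 0 < sb.getD i 0 := h i (le_refl i) (by omega)
    simp only [gains, if_neg h0, zero_add]
    exact ih (i+1) (fun j hj1 hj2 => h j (by omega) (by omega))

theorem loopA_sum : ∀ (fuel : Nat) (sa sb : List Int) (i : Nat),
    i + fuel ≤ sa.length → i + fuel ≤ sb.length →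
    (∀ p q, i ≤ p → p ≤ q → q < sa.length → sa.getD p 0 ≤ sa.getD q 0) →
    (∀ p q, i ≤ p → p ≤ q → q < sb.length → sb.getD q 0 ≤ sb.getD p 0) →
    (loopA fuel sa sb i).sum = sa.sum + gains fuel sa sb i := by
  intro fuel
  induction fuel with
  | zero => intro sa sb i _ _ _ _; simp [loopA, gains]
  | succ fuel ih =>
    intro sa sb i hla hlb hA hB
    by_cases h : sa.getD i 0 < sb.getD i 0
    · simp only [loopA, if_pos h, gains]
      have hia : i < sa.length := by omega
      have hib : i < sb.length := by omega
      rw [ih (sa.set i (sb.getD i 0)) (sb.set i (sa.getD i 0)) (i+1)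
            (by simp; omega) (by simp; omega)
            (by intro p q hp hpq hq
                rw [getD_set_ne _ _ _ _ _ (by omega), getD_set_ne _ _ _ _ _ (by omega)]
                exact hA p q (by omega) hpq (by simpa using hq))
            (by intro p q hp hpq hq
                rw [getD_set_ne _ _ _ _ _ (by omega), getD_set_ne _ _ _ _ _ (by omega)]
                exact hB p q (by omega) hpq (by simpa using hq))]
      rw [sum_set _ _ _ hia, gains_set fuel sa sb i _ _ (i+1) (Nat.lt_succ_self i)]
      ring
    · simp only [loopA, gains, if_neg h, zero_add]
      rw [gains_zero fuel sa sb (i+1)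
            (by intro j hj1 hj2 hlt
                exact h (lt_of_le_of_lt
                  (hA i j (le_refl i) (by omega) (by omega))
                  (lt_of_lt_of_le hlt (hB i j (le_refl i) (by omega) (by omega)))))]
      ring

theorem loopA_sum_break : ∀ (fuel : Nat) (sa sb : List Int) (i t : Nat),
    i ≤ t → t < i + fuel → t < sa.length → t < sb.length →
    (∀ p q, i ≤ p → p ≤ q → q ≤ t → sa.getD p 0 ≤ sa.getD q 0) →
    (∀ p q, i ≤ p → p ≤ q → q ≤ t → sb.getD q 0 ≤ sb.getD p 0) →
    ¬ sa.getD t 0 < sb.getD t 0 →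
    (loopA fuel sa sb i).sum = sa.sum + gains (t - i) sa sb i := by
  intro fuel
  induction fuel with
  | zero => intro sa sb i t hit hft _ _ _ _ _; omega
  | succ fuel ih =>
    intro sa sb i t hit hft hta htb hA hB hbr
    by_cases h : sa.getD i 0 < sb.getD i 0
    · have hlt : i < t := by
        rcases Nat.lt_or_ge i t with h' | h'
        · exact h'
        · exact absurd (hit.antisymm h' ▸ h) hbr
      simp only [loopA, if_pos h]
      rw [ih (sa.set i (sb.getD i 0)) (sb.set i (sa.getD i 0)) (i+1) t (by omega) (by omega)
            (by simpa using hta) (by simpa using htb)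
            (by intro p q hp hpq hq
                rw [getD_set_ne _ _ _ _ _ (by omega), getD_set_ne _ _ _ _ _ (by omega)]
                exact hA p q (by omega) hpq hq)
            (by intro p q hp hpq hq
                rw [getD_set_ne _ _ _ _ _ (by omega), getD_set_ne _ _ _ _ _ (by omega)]
                exact hB p q (by omega) hpq hq)
            (by rw [getD_set_ne _ _ _ _ _ (by omega), getD_set_ne _ _ _ _ _ (by omega)]
                exact hbr)]
      rw [sum_set _ _ _ (by omega), gains_set (t-(i+1)) sa sb i _ _ (i+1) (Nat.lt_succ_self i)]
      have h4 : t - i = (t - (i+1)) + 1 := by omega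
      rw [h4]
      have h5 : gains ((t - (i+1)) + 1) sa sb i
          = (if sa.getD i 0 < sb.getD i 0 then sb.getD i 0 - sa.getD i 0 else 0)
            + gains (t - (i+1)) sa sb (i+1) := rfl
      rw [h5, if_pos h]
      ring
    · simp only [loopA, if_neg h]
      rw [gains_zero (t - i) sa sb i
            (by intro j hj1 hj2 hlt
                exact h (lt_of_le_of_lt
                  (hA i j (le_refl i) hj1 (by omega))
                  (lt_of_lt_of_le hlt (hB i j (le_refl i) hj1 (by omega)))))]
      ring

theorem gains_shift (fuel : Nat) (x y : Int) (a b : List Int) :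
    ∀ i, gains fuel (x::a) (y::b) (i+1) = gains fuel a b i := by
  induction fuel with
  | zero => intro i; rfl
  | succ fuel ih => intro i; simp only [gains, List.getD_cons_succ, ih (i+1)]

theorem gains_succ_last (u : Nat) (sa sb : List Int) :
    ∀ i, gains (u+1) sa sb i = gains u sa sb i +
      (if sa.getD (i+u) 0 < sb.getD (i+u) 0 then sb.getD (i+u) 0 - sa.getD (i+u) 0 else 0) := by
  induction u with
  | zero => intro i; simp [gains]
  | succ u ih =>
    intro i
    have h1 : gains (u+1+1) sa sb i
        = (if sa.getD i 0 < sb.getD i 0 then sb.getD i 0 - sa.getD i 0 else 0) + gains (u+1) sa sb (i+1) := rfl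
    rw [h1, ih (i+1)]
    have h2 : gains (u+1) sa sb i
        = (if sa.getD i 0 < sb.getD i 0 then sb.getD i 0 - sa.getD i 0 else 0) + gains u sa sb (i+1) := rfl
    rw [h2]
    have h3 : i + 1 + u = i + (u + 1) := by omega
    rw [h3]
    ring

-- gains over fuel pairs when the condition holds exactly on the first T indices
theorem gains_take : ∀ (T : Nat) (fuel : Nat) (a b : List Int), T ≤ fuel →
    T ≤ a.length → T ≤ b.length →
    (∀ j, j < T → a.getD j 0 < b.getD j 0) →
    (∀ j, T ≤ j → j < fuel → ¬ a.getD j 0 < b.getD j 0) →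
    gains fuel a b 0 = (b.take T).sum - (a.take T).sum := by
  intro T
  induction T with
  | zero =>
    intro fuel a b _ _ _ _ hno
    simp only [List.take_zero, List.sum_nil, sub_zero]
    exact gains_zero fuel a b 0 (fun j hj1 hj2 => hno j (Nat.zero_le j) (by omega))
  | succ T ih =>
    intro fuel a b hTf hTa hTb hyes hno
    match fuel, a, b with
    | fuel+1, x::a', y::b' =>
      have hxy : x < y := by simpa using hyes 0 (Nat.succ_pos T)
      simp only [gains, List.getD_cons_zero, if_pos hxy, gains_shift]
      rw [ih fuel a' b' (by omega) (by simpa using hTa) (by simpa using hTb)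
            (fun j hj => by simpa using hyes (j+1) (by omega))
            (fun j hj1 hj2 => by simpa using hno (j+1) (by omega) (by omega))]
      simp only [List.take_succ_cons, List.sum_cons]
      ring

-- the binary search returns the crossover: all indices below it satisfy the condition, none at or above (below kk)
theorem bsearchB_spec (a b : List Int) (kk : Nat)
    (anti : ∀ i j, i ≤ j → j < kk → a.getD j 0 < b.getD j 0 → a.getD i 0 < b.getD i 0) :
    ∀ (fuel lo hi : Nat), hi - lo < fuel → lo ≤ hi → hi ≤ kk →
    (∀ j, j < lo → a.getD j 0 < b.getD j 0) →
    (∀ j, hi ≤ j → j < kk → ¬ a.getD j 0 < b.getD j 0) →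
    (∀ j, j < bsearchB fuel a b lo hi → a.getD j 0 < b.getD j 0) ∧
    (∀ j, bsearchB fuel a b lo hi ≤ j → j < kk → ¬ a.getD j 0 < b.getD j 0) ∧
    bsearchB fuel a b lo hi ≤ kk := by
  intro fuel
  induction fuel with
  | zero => intro lo hi h _ _ _ _; omega
  | succ fuel ih =>
    intro lo hi hfuel hlh hhk hlow hhigh
    by_cases hlt : lo < hi
    · simp only [bsearchB, if_pos hlt]
      have hmid1 : lo + 1 ≤ (lo + hi + 1) / 2 := by omega
      have hmid2 : (lo + hi + 1) / 2 ≤ hi := by omega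
      by_cases hc : a.getD ((lo + hi + 1) / 2 - 1) 0 < b.getD ((lo + hi + 1) / 2 - 1) 0
      · simp only [if_pos hc]
        exact ih ((lo + hi + 1) / 2) hi (by omega) (by omega) hhk
          (fun j hj => anti j ((lo + hi + 1) / 2 - 1) (by omega) (by omega) hc) hhigh
      · simp only [if_neg hc]
        exact ih lo ((lo + hi + 1) / 2 - 1) (by omega) (by omega) (by omega) hlow
          (fun j hj1 hj2 hcj => hc (anti ((lo + hi + 1) / 2 - 1) j (by omega) hj2 hcj))
    · simp only [bsearchB, if_neg hlt]
      have : lo = hi := by omega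
      exact ⟨hlow, fun j hj1 hj2 => hhigh j (by omega) hj2, by omega⟩

-- B's slice sums, rewritten through gains at the crossover T
theorem alt_eq_gains (a b : List Int) (kk T : Nat)
    (hTk : T ≤ kk) (hka : kk ≤ a.length) (hkb : kk ≤ b.length)
    (hyes : ∀ j, j < T → a.getD j 0 < b.getD j 0)
    (hno : ∀ j, T ≤ j → j < kk → ¬ a.getD j 0 < b.getD j 0) :
    (a.drop T).sum + (b.take T).sum = a.sum + gains kk a b 0 := by
  rw [gains_take T kk a b hTk (by omega) (by omega) hyes hno]
  have := List.sum_take_add_sum_drop a T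
  omega

theorem solution_spec : Claim_equal_solution := by
  intro n k array_a array_b _ hpre
  unfold Spec_solution solution solution_alt
  simp only []
  have hlena : (PySem.List.sorted array_a (fun x => x) false).length = array_a.length :=
    PySem.List.length_sorted array_a (fun x => x) false
  have hlenb : (PySem.List.sorted array_b (fun x => x) true).length = array_b.length :=
    PySem.List.length_sorted array_b (fun x => x) true
  set a := PySem.List.sorted array_a (fun x => x) false with ha
  set b := PySem.List.sorted array_b (fun x => x) true with hb
  have hA : ∀ p q, p ≤ q → q < a.length → a.getD p 0 ≤ a.getD q 0 := by
    intro p q hpq hq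
    rw [List.getD_eq_getElem _ _ (lt_of_le_of_lt hpq hq), List.getD_eq_getElem _ _ hq]
    exact PySem.List.sorted_id_getElem_mono array_a hpq hq
  have hB : ∀ p q, p ≤ q → q < b.length → b.getD q 0 ≤ b.getD p 0 := by
    intro p q hpq hq
    have hp : p < b.length := lt_of_le_of_lt hpq hq
    rw [List.getD_eq_getElem _ _ hp, List.getD_eq_getElem _ _ hq]
    rcases eq_or_lt_of_le hpq with rfl | hlt
    · exact le_refl _
    · exact (List.pairwise_iff_getElem.mp
        (PySem.List.sorted_pairwise_rev array_b (fun x => x))) p q hp hq hlt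
  -- the clamped bound kk of B
  set kk : Nat := if (min k (min (a.length : Int) (b.length : Int))) < 0 then 0
      else (min k (min (a.length : Int) (b.length : Int))).toNat with hkk
  have hka : kk ≤ a.length := by rw [hkk]; split <;> omega
  have hkb : kk ≤ b.length := by rw [hkk]; split <;> omega
  have anti : ∀ i j, i ≤ j → j < kk → a.getD j 0 < b.getD j 0 → a.getD i 0 < b.getD i 0 :=
    fun i j hij hj hc =>
      lt_of_le_of_lt (hA i j hij (by omega)) (lt_of_lt_of_le hc (hB i j hij (by omega)))
  obtain ⟨hyes, hno, hTk⟩ := bsearchB_spec a b kk anti (kk+1) 0 kk (by omega) (Nat.zero_le _)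
    (le_refl _) (fun j hj => absurd hj (Nat.not_lt_zero j)) (fun j hj1 hj2 => absurd hj2 (by omega))
  rw [alt_eq_gains a b kk (bsearchB (kk+1) a b 0 kk) hTk hka hkb hyes hno]
  by_cases hk : k ≤ ((min array_a.length array_b.length : Nat) : Int)
  · -- k never overruns either array: A's loop has fuel k.toNat, and kk = k.toNat
    have hkkk : kk = k.toNat := by rw [hkk, hlena, hlenb]; push_cast at hk ⊢; split <;> omega
    rw [hkkk] at *
    rw [loopA_sum k.toNat a b 0 (by omega) (by omega)
          (fun p q _ hpq hq => hA p q hpq hq) (fun p q _ hpq hq => hB p q hpq hq)]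
  · -- k overruns: Pre_ says the loop breaks at index m-1 at the latest, and kk = m
    rcases hpre with hk' | ⟨hm, hcmp⟩
    · exact absurd hk' hk
    have hbr : ¬ a.getD (min array_a.length array_b.length - 1) 0 <
        b.getD (min array_a.length array_b.length - 1) 0 := not_lt.mpr hcmp
    have hkkk : kk = min array_a.length array_b.length := by
      rw [hkk, hlena, hlenb]; push_cast at hk ⊢; split <;> omega
    rw [hkkk] at *
    rw [loopA_sum_break k.toNat a b 0 (min array_a.length array_b.length - 1)
          (Nat.zero_le _) (by push_cast at hk; omega) (by omega) (by omega)
          (fun p q _ hpq hq => hA p q hpq (by omega))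
          (fun p q _ hpq hq => hB p q hpq (by omega)) hbr]
    have h6 : min array_a.length array_b.length
        = (min array_a.length array_b.length - 1) + 1 := by omega
    rw [h6, gains_succ_last, if_neg (by simpa using hbr)]
    have h7 : (min array_a.length array_b.length - 1) + 1 - 1
        = min array_a.length array_b.length - 1 := by omega
    rw [h7]
    norm_num
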